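-- pv_equiv track=rewrite | github.com/Pichardescu/yang-mills-s3-computations | yang_mills_s3/rg/banach_norm.py | build_block_adjacency
-- ===== SOURCE A (Python) =====
-- from typing import Optional, Dict, List, Tuple, Set, Any
--
-- def build_block_adjacency(n_blocks: int,
--                           block_vertex_lists: List[List[int]]) -> Dict[int, Set[int]]:
--     """
--     Build block adjacency from shared vertices.
--
--     Two blocks are adjacent if they share at least one vertex.
--
--     THEOREM: For the 600-cell, each cell shares faces with exactly
--     the expected number of neighbors (from the cell complex structure).
--
--     Parameters
--     ----------
--     n_blocks : int
--         Number of blocks.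
--     block_vertex_lists : list of list of int
--         For each block, list of vertex indices.
--
--     Returns
--     -------
--     adjacency : dict
--         {block_id: set of neighbor block_ids}
--     """
--     adjacency = {i: set() for i in range(n_blocks)}
--
--     # Build vertex-to-block map
--     vertex_to_blocks = {}
--     for block_id, vertices in enumerate(block_vertex_lists):
--         for v in vertices:
--             if v not in vertex_to_blocks:
--                 vertex_to_blocks[v] = set()
--             vertex_to_blocks[v].add(block_id)
--
--     # Blocks sharing a vertex are adjacent
--     for v, blocks in vertex_to_blocks.items():
--         for b1 in blocks:
--             for b2 in blocks:
--                 if b1 != b2: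
--                     adjacency[b1].add(b2)
--
--     return adjacency
-- ===== SOURCE B (Python) =====
-- def build_block_adjacency(n_blocks, block_vertex_lists):
--     """Direct pairwise intersection test instead of A's vertex->blocks inverted
--     index: for each unordered pair i < j, if the two vertex sets intersect,
--     record both directions. adjacency[i]/adjacency[j] raise KeyError exactly
--     where A's adjacency[b1] does (a sharing block index >= n_blocks)."""
--     adjacency = {i: set() for i in range(n_blocks)}
--     vsets = [set(vs) for vs in block_vertex_lists]
--     n = len(vsets)
--     for i in range(n):
--         for j in range(i + 1, n):
--             if vsets[i] & vsets[j]: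
--                 adjacency[i].add(j)
--                 adjacency[j].add(i)
--     return adjacency
-- ===== Notes on version B (the rewrite author's own statement) =====
-- stated objective: simpler
-- what changed: B drops A's vertex-to-blocks inverted index and its two-phase closure over that index: it tests each unordered pair of blocks i < j directly for a non-empty vertex-set intersection and records both directions, raising KeyError at the same inputs A does.
import Mathlib
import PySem

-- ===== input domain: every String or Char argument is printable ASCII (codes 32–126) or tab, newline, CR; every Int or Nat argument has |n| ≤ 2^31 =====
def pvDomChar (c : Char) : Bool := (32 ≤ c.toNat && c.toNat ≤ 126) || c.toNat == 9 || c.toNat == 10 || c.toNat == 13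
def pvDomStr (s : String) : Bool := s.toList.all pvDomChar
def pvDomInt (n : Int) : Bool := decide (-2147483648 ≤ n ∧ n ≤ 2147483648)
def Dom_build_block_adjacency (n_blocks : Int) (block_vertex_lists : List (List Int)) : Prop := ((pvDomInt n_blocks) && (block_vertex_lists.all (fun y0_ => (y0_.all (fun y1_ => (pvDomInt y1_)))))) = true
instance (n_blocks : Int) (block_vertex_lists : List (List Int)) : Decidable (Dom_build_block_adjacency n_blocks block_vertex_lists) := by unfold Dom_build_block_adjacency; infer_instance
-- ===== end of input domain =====

-- B replaces A's vertex→blocks inverted index and its two-phase closure by a direct pairwise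
-- intersection test over unordered block pairs (objective: simpler). Returned set values are
-- rendered in sorted order in both ports (Python's set iteration order is not modelled; the
-- returned sets are compared as finite sets).

-- ===== PORT A =====
-- adjacency = {i: set() for i in range(n_blocks)}
def pvA_init (n_blocks : Int) : PySem.Dict Int (PySem.Set Int) :=
  (PySem.List.pyRange 0 n_blocks 1).foldl (fun d i => d.insert i PySem.Set.empty) PySem.Dict.empty

-- one step of the vertex-to-blocks loop: for v in vertices: if v not in d: d[v] = set(); d[v].add(block_id)
def pvA_v2bStep (d : PySem.Dict Int (PySem.Set Int)) (p : Int × List Int) : PySem.Dict Int (PySem.Set Int) :=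
  p.2.foldl (fun d v =>
    (if d.contains v then d else d.insert v PySem.Set.empty).modify v PySem.Set.empty
      (fun s => PySem.Set.add s p.1)) d

def pvA_v2b (block_vertex_lists : List (List Int)) : PySem.Dict Int (PySem.Set Int) :=
  (PySem.List.enumerate block_vertex_lists 0).foldl pvA_v2bStep PySem.Dict.empty

-- one step of the pairing loop: for b1 in blocks: for b2 in blocks: if b1 != b2: adjacency[b1].add(b2)
-- adjacency[b1] raises KeyError when b1 is not a key: excluded by Pre_ (modify's default is then unused)
def pvA_pairStep (a : PySem.Dict Int (PySem.Set Int)) (p : Int × List Int) : PySem.Dict Int (PySem.Set Int) :=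
  p.2.foldl (fun a b1 =>
    p.2.foldl (fun a b2 =>
      if b1 ≠ b2 then a.modify b1 PySem.Set.empty (fun s => PySem.Set.add s b2) else a) a) a

def build_block_adjacency (n_blocks : Int) (block_vertex_lists : List (List Int)) : List (Int × List Int) :=
  let adjacency := pvA_init n_blocks
  let vertex_to_blocks := pvA_v2b block_vertex_lists
  let adjacency := vertex_to_blocks.items.foldl pvA_pairStep adjacency
  -- set values rendered sorted (set iteration order is unmodelled; output sets compared as finite sets)
  adjacency.items.map (fun p => (p.1, PySem.List.sorted p.2 (fun x => x)))

-- ===== PORT B =====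
-- adjacency = {i: set() for i in range(n_blocks)}
def pvB_init (n_blocks : Int) : PySem.Dict Int (PySem.Set Int) :=
  (PySem.List.pyRange 0 n_blocks 1).foldl (fun d i => d.insert i PySem.Set.empty) PySem.Dict.empty

-- if vsets[i] & vsets[j]:  (truthiness of the intersection = not disjoint)
def pvB_share (vsets : List (PySem.Set Int)) (i j : Int) : Bool :=
  !(PySem.Set.isdisjoint (PySem.List.pyGetD vsets i PySem.Set.empty)
                         (PySem.List.pyGetD vsets j PySem.Set.empty))

-- for j in range(i+1, n): if vsets[i] & vsets[j]: adjacency[i].add(j); adjacency[j].add(i)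
-- adjacency[i]/adjacency[j] raise KeyError when not a key: excluded by Pre_ (modify's default unused)
def pvB_inner (vsets : List (PySem.Set Int)) (n i : Int) (a : PySem.Dict Int (PySem.Set Int)) :
    PySem.Dict Int (PySem.Set Int) :=
  (PySem.List.pyRange (i + 1) n 1).foldl (fun a j =>
    if pvB_share vsets i j then
      (a.modify i PySem.Set.empty (fun s => PySem.Set.add s j)).modify j PySem.Set.empty
        (fun s => PySem.Set.add s i)
    else a) a

def pvB_pairs (vsets : List (PySem.Set Int)) (n : Int) (a : PySem.Dict Int (PySem.Set Int)) :
    PySem.Dict Int (PySem.Set Int) :=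
  (PySem.List.pyRange 0 n 1).foldl (fun a i => pvB_inner vsets n i a) a

def build_block_adjacency_alt (n_blocks : Int) (block_vertex_lists : List (List Int)) : List (Int × List Int) :=
  let adjacency := pvB_init n_blocks
  let vsets : List (PySem.Set Int) := block_vertex_lists.map PySem.Set.ofList
  let n : Int := vsets.length
  let adjacency := pvB_pairs vsets n adjacency
  -- set values rendered sorted (as in port A)
  adjacency.items.map (fun p => (p.1, PySem.List.sorted p.2 (fun x => x)))

-- ===== PRECONDITION & SPEC =====
-- Pre_ excludes exactly the inputs on which A raises KeyError: two distinct blocks sharing a vertex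
-- while one of their indices is ≥ n_blocks (adjacency has keys 0..n_blocks-1 only). B raises KeyError
-- on exactly the same inputs.
def Pre_build_block_adjacency (n_blocks : Int) (block_vertex_lists : List (List Int)) : Prop :=
  ∀ i < block_vertex_lists.length, ∀ j < block_vertex_lists.length, i ≠ j →
    (∃ v ∈ block_vertex_lists.getD i [], v ∈ block_vertex_lists.getD j []) → (i : Int) < n_blocks
instance (n_blocks : Int) (block_vertex_lists : List (List Int)) : Decidable (Pre_build_block_adjacency n_blocks block_vertex_lists) := by unfold Pre_build_block_adjacency; exact Nat.decidableBallLT _ _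

def pvWitness_build_block_adjacency : Int × List (List Int) := (3, [[0, 1], [1, 2], [5]])

def Spec_build_block_adjacency (n_blocks : Int) (block_vertex_lists : List (List Int)) (out : List (Int × List Int)) : Prop := out = build_block_adjacency_alt n_blocks block_vertex_lists
instance (n_blocks : Int) (block_vertex_lists : List (List Int)) (out : List (Int × List Int)) : Decidable (Spec_build_block_adjacency n_blocks block_vertex_lists out) := by unfold Spec_build_block_adjacency; infer_instance

-- ===== CLAIM (what is proved, stated in full; the proofs are below) =====
def Claim_equal_build_block_adjacency : Prop := ∀ (n_blocks : Int) (block_vertex_lists : List (List Int)), Dom_build_block_adjacency n_blocks block_vertex_lists → Pre_build_block_adjacency n_blocks block_vertex_lists → Spec_build_block_adjacency n_blocks block_vertex_lists (build_block_adjacency n_blocks block_vertex_lists)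

-- ===== LEMMAS AND PROOFS =====

theorem pv_init_getD_aux (l : List Int) (d : PySem.Dict Int (PySem.Set Int))
    (h : ∀ j, d.getD j PySem.Set.empty = PySem.Set.empty) (i : Int) :
    (l.foldl (fun d x => d.insert x PySem.Set.empty) d).getD i PySem.Set.empty = PySem.Set.empty := by
  induction l generalizing d with
  | nil => simpa using h i
  | cons x l ih =>
    simp only [List.foldl_cons]
    refine ih _ (fun j => ?_)
    rw [PySem.Dict.getD_insert]
    split
    · rfl
    · exact h j

theorem pv_init_getD (n i : Int) : (pvA_init n).getD i PySem.Set.empty = PySem.Set.empty :=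
  pv_init_getD_aux _ _ (fun j => PySem.Dict.getD_empty j _) i

theorem pv_init_keys (n : Int) : (pvA_init n).keys = PySem.List.pyRange 0 n 1 := by
  unfold pvA_init
  rw [show (fun (d : PySem.Dict Int (PySem.Set Int)) (i : Int) => d.insert i PySem.Set.empty)
        = fun d x => d.insert x ((fun (_ : PySem.Dict Int (PySem.Set Int)) (_ : Int) => (PySem.Set.empty : PySem.Set Int)) d x) from rfl,
      PySem.Dict.keys_foldl_insert, PySem.Dict.keys_empty, PySem.Set.update_nil_left,
      PySem.Set.ofList_eq_self_of_nodup _ (PySem.List.nodup_pyRange_one 0 n)]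

theorem pvB_init_eq (n : Int) : pvB_init n = pvA_init n := rfl

theorem pv_inner1 (vs : List Int) (idx : Int) (d : PySem.Dict Int (PySem.Set Int)) (w : Int) :
    (vs.foldl (fun d v =>
        (if d.contains v then d else d.insert v PySem.Set.empty).modify v PySem.Set.empty
          (fun s => PySem.Set.add s idx)) d).getD w PySem.Set.empty
      = if w ∈ vs then PySem.Set.add (d.getD w PySem.Set.empty) idx else d.getD w PySem.Set.empty := by
  induction vs generalizing d with
  | nil => simp
  | cons v vs ih =>
    simp only [List.foldl_cons]
    rw [ih]
    have hne : d.getD v PySem.Set.empty = (if d.contains v then d else d.insert v PySem.Set.empty).getD v PySem.Set.empty := by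
      by_cases hc : d.contains v
      · simp [hc]
      · simp only [hc, Bool.false_eq_true, ite_false]
        rw [PySem.Dict.getD_insert, if_pos rfl, PySem.Dict.getD_of_not_contains _ _ (by simpa using hc)]
    have hstep : ∀ w' : Int,
        ((if d.contains v then d else d.insert v PySem.Set.empty).modify v PySem.Set.empty
          (fun s => PySem.Set.add s idx)).getD w' PySem.Set.empty
        = if w' = v then PySem.Set.add (d.getD v PySem.Set.empty) idx else d.getD w' PySem.Set.empty := by
      intro w'
      rw [PySem.Dict.getD_modify]
      by_cases hw : w' = v
      · rw [if_pos hw, if_pos hw, ← hne]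
      · rw [if_neg hw, if_neg hw]
        by_cases hc : d.contains v
        · simp [hc]
        · simp only [hc, Bool.false_eq_true, ite_false]
          rw [PySem.Dict.getD_insert, if_neg hw]
    rw [hstep]
    by_cases h1 : w = v <;> by_cases h2 : w ∈ vs <;>
      simp [h1, h2]

theorem pv_v2b_mem_aux (el : List (Int × List Int)) (d : PySem.Dict Int (PySem.Set Int)) (w b : Int) :
    b ∈ (el.foldl pvA_v2bStep d).getD w PySem.Set.empty ↔
      b ∈ d.getD w PySem.Set.empty ∨ ∃ p ∈ el, w ∈ p.2 ∧ b = p.1 := by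
  induction el generalizing d with
  | nil => simp
  | cons p el ih =>
    simp only [List.foldl_cons]
    rw [ih]
    have hstep : b ∈ (pvA_v2bStep d p).getD w PySem.Set.empty ↔
        b ∈ d.getD w PySem.Set.empty ∨ (w ∈ p.2 ∧ b = p.1) := by
      unfold pvA_v2bStep
      rw [pv_inner1]
      split
      · rename_i hw
        simp [PySem.Set.mem_add, hw]
      · rename_i hw
        simp [hw]
    rw [hstep]
    simp only [List.mem_cons]
    constructor
    · rintro ((hd | ⟨hw, hb⟩) | ⟨q, hq, h1, h2⟩)
      · exact Or.inl hd
      · exact Or.inr ⟨p, Or.inl rfl, hw, hb⟩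
      · exact Or.inr ⟨q, Or.inr hq, h1, h2⟩
    · rintro (hd | ⟨q, (rfl | hq), h1, h2⟩)
      · exact Or.inl (Or.inl hd)
      · exact Or.inl (Or.inr ⟨h1, h2⟩)
      · exact Or.inr ⟨q, hq, h1, h2⟩

theorem pv_v2b_mem (L : List (List Int)) (w b : Int) :
    b ∈ (pvA_v2b L).getD w PySem.Set.empty ↔
      ∃ (k : Nat), ∃ _ : k < L.length, b = (k : Int) ∧ w ∈ L[k] := by
  unfold pvA_v2b
  rw [pv_v2b_mem_aux]
  simp only [PySem.Dict.getD_empty]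
  constructor
  · rintro (h | ⟨p, hp, hw, hb⟩)
    · simp at h
    · rcases (PySem.List.mem_enumerate_iff _ _ _).mp hp with ⟨k, hk, rfl⟩
      exact ⟨k, hk, by simpa using hb, by simpa using hw⟩
  · rintro ⟨k, hk, hb, hw⟩
    refine Or.inr ⟨((k : Int), L[k]), ?_, hw, hb⟩
    exact (PySem.List.mem_enumerate_iff _ _ _).mpr ⟨k, hk, by simp⟩

theorem pv_nodup_keys_modify (d : PySem.Dict Int (PySem.Set Int)) (k : Int) (d0 : PySem.Set Int)
    (f : PySem.Set Int → PySem.Set Int) (h : d.keys.Nodup) : (d.modify k d0 f).keys.Nodup := by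
  rw [PySem.Dict.keys_modify]
  exact PySem.Dict.nodup_keys_insert _ _ _ h

theorem pv_v2bStep_keys_nodup (d : PySem.Dict Int (PySem.Set Int)) (p : Int × List Int)
    (h : d.keys.Nodup) : (pvA_v2bStep d p).keys.Nodup := by
  unfold pvA_v2bStep
  generalize p.2 = vs
  induction vs generalizing d with
  | nil => exact h
  | cons v vs ih =>
    simp only [List.foldl_cons]
    refine ih _ (pv_nodup_keys_modify _ _ _ _ ?_)
    split
    · exact h
    · exact PySem.Dict.nodup_keys_insert _ _ _ h

theorem pv_v2b_keys_nodup (L : List (List Int)) : (pvA_v2b L).keys.Nodup := by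
  unfold pvA_v2b
  generalize PySem.List.enumerate L 0 = el
  suffices hgen : ∀ d : PySem.Dict Int (PySem.Set Int), d.keys.Nodup → (el.foldl pvA_v2bStep d).keys.Nodup from
    hgen _ PySem.Dict.nodup_keys_empty
  induction el with
  | nil => exact fun d h => h
  | cons p el ih => exact fun d h => ih _ (pv_v2bStep_keys_nodup d p h)

theorem pv_in3_mem (s2 : List Int) (b1 i j : Int) (a : PySem.Dict Int (PySem.Set Int)) :
    j ∈ (s2.foldl (fun a b2 =>
          if b1 ≠ b2 then a.modify b1 PySem.Set.empty (fun s => PySem.Set.add s b2) else a) a).getD i PySem.Set.empty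
      ↔ j ∈ a.getD i PySem.Set.empty ∨ (i = b1 ∧ j ∈ s2 ∧ j ≠ b1) := by
  induction s2 generalizing a with
  | nil => simp
  | cons b2 s2 ih =>
    simp only [List.foldl_cons]
    rw [ih]
    have hstep : j ∈ (if b1 ≠ b2 then a.modify b1 PySem.Set.empty (fun s => PySem.Set.add s b2) else a).getD i PySem.Set.empty
        ↔ j ∈ a.getD i PySem.Set.empty ∨ (i = b1 ∧ j = b2 ∧ j ≠ b1) := by
      split
      · rename_i hne
        rw [PySem.Dict.getD_modify]
        by_cases hi : i = b1
        · subst hi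
          rw [if_pos rfl, PySem.Set.mem_add]
          constructor
          · rintro (h | rfl)
            · exact Or.inl h
            · exact Or.inr ⟨rfl, rfl, Ne.symm hne⟩
          · rintro (h | ⟨-, rfl, -⟩)
            · exact Or.inl h
            · exact Or.inr rfl
        · rw [if_neg hi]
          simp [hi]
      · rename_i hne
        have hb : b1 = b2 := not_not.mp hne
        subst hb
        constructor
        · exact Or.inl
        · rintro (h | ⟨-, rfl, hj⟩)
          · exact h
          · exact absurd rfl hj
    rw [hstep]
    simp only [List.mem_cons]
    tauto

theorem pv_mid3_mem (bl s2 : List Int) (i j : Int) (a : PySem.Dict Int (PySem.Set Int)) :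
    j ∈ (bl.foldl (fun a b1 =>
          s2.foldl (fun a b2 =>
            if b1 ≠ b2 then a.modify b1 PySem.Set.empty (fun s => PySem.Set.add s b2) else a) a) a).getD i PySem.Set.empty
      ↔ j ∈ a.getD i PySem.Set.empty ∨ (i ∈ bl ∧ j ∈ s2 ∧ j ≠ i) := by
  induction bl generalizing a with
  | nil => simp
  | cons b1 bl ih =>
    simp only [List.foldl_cons]
    rw [ih, pv_in3_mem]
    simp only [List.mem_cons]
    constructor
    · rintro ((h | ⟨rfl, hj, hne⟩) | ⟨hi, hj, hne⟩)
      · exact Or.inl h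
      · exact Or.inr ⟨Or.inl rfl, hj, fun h => hne (h ▸ rfl)⟩
      · exact Or.inr ⟨Or.inr hi, hj, hne⟩
    · rintro (h | ⟨(rfl | hi), hj, hne⟩)
      · exact Or.inl (Or.inl h)
      · exact Or.inl (Or.inr ⟨rfl, hj, fun h => hne (h ▸ rfl)⟩)
      · exact Or.inr ⟨hi, hj, hne⟩

theorem pv_out3_mem (its : List (Int × List Int)) (i j : Int) (a : PySem.Dict Int (PySem.Set Int)) :
    j ∈ (its.foldl pvA_pairStep a).getD i PySem.Set.empty
      ↔ j ∈ a.getD i PySem.Set.empty ∨ ∃ p ∈ its, i ∈ p.2 ∧ j ∈ p.2 ∧ j ≠ i := by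
  induction its generalizing a with
  | nil => simp
  | cons p its ih =>
    simp only [List.foldl_cons]
    rw [ih]
    have hstep := pv_mid3_mem p.2 p.2 i j a
    unfold pvA_pairStep
    rw [hstep]
    simp only [List.mem_cons]
    constructor
    · rintro ((h | ⟨hi, hj, hne⟩) | ⟨q, hq, h1, h2, h3⟩)
      · exact Or.inl h
      · exact Or.inr ⟨p, Or.inl rfl, hi, hj, hne⟩
      · exact Or.inr ⟨q, Or.inr hq, h1, h2, h3⟩
    · rintro (h | ⟨q, (rfl | hq), h1, h2, h3⟩)
      · exact Or.inl (Or.inl h)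
      · exact Or.inl (Or.inr ⟨h1, h2, h3⟩)
      · exact Or.inr ⟨q, hq, h1, h2, h3⟩

theorem pv_in3_keys (s2 : List Int) (b1 : Int) (a : PySem.Dict Int (PySem.Set Int)) (K : List Int)
    (hK : a.keys = K) (hb : (∃ b2 ∈ s2, b1 ≠ b2) → b1 ∈ K) :
    (s2.foldl (fun a b2 =>
      if b1 ≠ b2 then a.modify b1 PySem.Set.empty (fun s => PySem.Set.add s b2) else a) a).keys = K := by
  induction s2 generalizing a with
  | nil => exact hK
  | cons b2 s2 ih =>
    simp only [List.foldl_cons]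
    refine ih _ ?_ (fun ⟨b2', hm, hne'⟩ => hb ⟨b2', List.mem_cons_of_mem _ hm, hne'⟩)
    split
    · rename_i hne
      have hmem : b1 ∈ K := hb ⟨b2, List.mem_cons_self .., hne⟩
      have hc : a.contains b1 = true :=
        (PySem.Dict.contains_iff_mem_keys _ _).mpr (hK ▸ hmem)
      rw [PySem.Dict.keys_modify, PySem.Dict.keys_insert_of_contains _ _ hc]
      exact hK
    · exact hK

theorem pv_mid3_keys (bl s2 : List Int) (a : PySem.Dict Int (PySem.Set Int)) (K : List Int)
    (hK : a.keys = K) (hb : ∀ b1 ∈ bl, (∃ b2 ∈ s2, b1 ≠ b2) → b1 ∈ K) :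
    (bl.foldl (fun a b1 =>
      s2.foldl (fun a b2 =>
        if b1 ≠ b2 then a.modify b1 PySem.Set.empty (fun s => PySem.Set.add s b2) else a) a) a).keys = K := by
  induction bl generalizing a with
  | nil => exact hK
  | cons b1 bl ih =>
    simp only [List.foldl_cons]
    exact ih _ (pv_in3_keys s2 b1 a K hK (hb b1 (List.mem_cons_self ..)))
      (fun b1' hm => hb b1' (List.mem_cons_of_mem _ hm))

theorem pv_out3_keys (its : List (Int × List Int)) (a : PySem.Dict Int (PySem.Set Int)) (K : List Int)
    (hK : a.keys = K) (hb : ∀ p ∈ its, ∀ b1 ∈ p.2, (∃ b2 ∈ p.2, b1 ≠ b2) → b1 ∈ K) :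
    (its.foldl pvA_pairStep a).keys = K := by
  induction its generalizing a with
  | nil => exact hK
  | cons p its ih =>
    simp only [List.foldl_cons]
    exact ih _ (pv_mid3_keys p.2 p.2 a K hK (hb p (List.mem_cons_self ..)))
      (fun q hq => hb q (List.mem_cons_of_mem _ hq))

theorem pv_nodupvals_in3 (s2 : List Int) (b1 : Int) (a : PySem.Dict Int (PySem.Set Int))
    (h : ∀ i, (a.getD i PySem.Set.empty).Nodup) :
    ∀ i, ((s2.foldl (fun a b2 =>
      if b1 ≠ b2 then a.modify b1 PySem.Set.empty (fun s => PySem.Set.add s b2) else a) a).getD i PySem.Set.empty).Nodup := by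
  induction s2 generalizing a with
  | nil => exact h
  | cons b2 s2 ih =>
    simp only [List.foldl_cons]
    refine ih _ (fun i => ?_)
    split
    · rw [PySem.Dict.getD_modify]
      split
      · exact PySem.Set.nodup_add _ _ (h b1)
      · exact h i
    · exact h i

theorem pv_nodupvals_mid3 (bl s2 : List Int) (a : PySem.Dict Int (PySem.Set Int))
    (h : ∀ i, (a.getD i PySem.Set.empty).Nodup) :
    ∀ i, ((bl.foldl (fun a b1 =>
      s2.foldl (fun a b2 =>
        if b1 ≠ b2 then a.modify b1 PySem.Set.empty (fun s => PySem.Set.add s b2) else a) a) a).getD i PySem.Set.empty).Nodup := by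
  induction bl generalizing a with
  | nil => exact h
  | cons b1 bl ih =>
    simp only [List.foldl_cons]
    exact ih _ (pv_nodupvals_in3 s2 b1 a h)

theorem pv_nodupvals_out3 (its : List (Int × List Int)) (a : PySem.Dict Int (PySem.Set Int))
    (h : ∀ i, (a.getD i PySem.Set.empty).Nodup) :
    ∀ i, ((its.foldl pvA_pairStep a).getD i PySem.Set.empty).Nodup := by
  induction its generalizing a with
  | nil => exact h
  | cons p its ih =>
    simp only [List.foldl_cons]
    exact ih _ (pv_nodupvals_mid3 p.2 p.2 a h)

-- members of a v2b items entry are shared-block indices: the final characterisation of A's adjacency value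
theorem pv_final_mem (n_blocks : Int) (L : List (List Int)) (i j : Int) :
    j ∈ ((pvA_v2b L).items.foldl pvA_pairStep (pvA_init n_blocks)).getD i PySem.Set.empty
      ↔ ∃ (k k' : Nat), k < L.length ∧ k' < L.length ∧ i = (k : Int) ∧ j = (k' : Int) ∧ k ≠ k' ∧
          ∃ v ∈ L.getD k [], v ∈ L.getD k' [] := by
  have hnk := pv_v2b_keys_nodup L
  rw [pv_out3_mem, pv_init_getD]
  simp only [PySem.Set.empty, List.not_mem_nil, false_or]
  constructor
  · rintro ⟨p, hp, hi, hj, hne⟩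
    have hget : (pvA_v2b L).get? p.1 = some p.2 :=
      (PySem.Dict.get?_eq_some_iff_mem_items _ _ _ hnk).mpr (by simpa using hp)
    have hgd : (pvA_v2b L).getD p.1 PySem.Set.empty = p.2 := by
      rw [PySem.Dict.getD_eq_get?_getD, hget, Option.getD_some]
    rcases (pv_v2b_mem L p.1 i).mp (hgd ▸ hi) with ⟨k, hk, hik, hvk⟩
    rcases (pv_v2b_mem L p.1 j).mp (hgd ▸ hj) with ⟨k', hk', hjk, hvk'⟩
    refine ⟨k, k', hk, hk', hik, hjk, ?_, p.1, ?_, ?_⟩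
    · rintro rfl
      exact hne (hjk.trans hik.symm)
    · rw [List.getD_eq_getElem _ _ hk]; exact hvk
    · rw [List.getD_eq_getElem _ _ hk']; exact hvk'
  · rintro ⟨k, k', hk, hk', hik, hjk, hkk, v, hv, hv'⟩
    have hiv : i ∈ (pvA_v2b L).getD v PySem.Set.empty :=
      (pv_v2b_mem L v i).mpr ⟨k, hk, hik, by rw [List.getD_eq_getElem _ _ hk] at hv; exact hv⟩
    have hjv : j ∈ (pvA_v2b L).getD v PySem.Set.empty :=
      (pv_v2b_mem L v j).mpr ⟨k', hk', hjk, by rw [List.getD_eq_getElem _ _ hk'] at hv'; exact hv'⟩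
    cases hget : (pvA_v2b L).get? v with
    | none =>
      rw [PySem.Dict.getD_eq_get?_getD, hget, Option.getD_none] at hiv
      simp [PySem.Set.empty] at hiv
    | some sv =>
      have hgd : (pvA_v2b L).getD v PySem.Set.empty = sv := by
        rw [PySem.Dict.getD_eq_get?_getD, hget, Option.getD_some]
      refine ⟨(v, sv), PySem.Dict.mem_items_of_get?_eq_some _ hget, hgd ▸ hiv, hgd ▸ hjv, ?_⟩
      rintro rfl
      exact hkk (by exact_mod_cast (hjk.symm.trans hik).symm)

theorem pv_final_keys (n_blocks : Int) (L : List (List Int))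
    (hpre : Pre_build_block_adjacency n_blocks L) :
    ((pvA_v2b L).items.foldl pvA_pairStep (pvA_init n_blocks)).keys = PySem.List.pyRange 0 n_blocks 1 := by
  have hnk := pv_v2b_keys_nodup L
  refine pv_out3_keys _ _ _ (pv_init_keys n_blocks) ?_
  rintro p hp b1 hb1 ⟨b2, hb2, hne⟩
  have hget : (pvA_v2b L).get? p.1 = some p.2 :=
    (PySem.Dict.get?_eq_some_iff_mem_items _ _ _ hnk).mpr (by simpa using hp)
  have hgd : (pvA_v2b L).getD p.1 PySem.Set.empty = p.2 := by
    rw [PySem.Dict.getD_eq_get?_getD, hget, Option.getD_some]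
  rcases (pv_v2b_mem L p.1 b1).mp (hgd ▸ hb1) with ⟨k, hk, hik, hvk⟩
  rcases (pv_v2b_mem L p.1 b2).mp (hgd ▸ hb2) with ⟨k', hk', hjk, hvk'⟩
  have hkk : k ≠ k' := by
    rintro rfl
    exact hne (hik.trans hjk.symm)
  have hlt : (k : Int) < n_blocks := by
    refine hpre k hk k' hk' hkk ⟨p.1, ?_, ?_⟩
    · rw [List.getD_eq_getElem _ _ hk]; exact hvk
    · rw [List.getD_eq_getElem _ _ hk']; exact hvk'
  rw [PySem.List.mem_pyRange_one]
  exact ⟨hik ▸ Int.natCast_nonneg k, hik ▸ hlt⟩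

-- ---- B-side lemmas ----

theorem pvB_inner_mem (vsets : List (PySem.Set Int)) (S : List Int) (i : Int)
    (a : PySem.Dict Int (PySem.Set Int)) (hne : ∀ j ∈ S, i ≠ j) (w v : Int) :
    v ∈ (S.foldl (fun a j =>
        if pvB_share vsets i j then
          (a.modify i PySem.Set.empty (fun s => PySem.Set.add s j)).modify j PySem.Set.empty
            (fun s => PySem.Set.add s i)
        else a) a).getD w PySem.Set.empty
      ↔ v ∈ a.getD w PySem.Set.empty ∨
          ∃ j ∈ S, pvB_share vsets i j = true ∧ ((w = i ∧ v = j) ∨ (w = j ∧ v = i)) := by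
  induction S generalizing a with
  | nil => simp
  | cons j S ih =>
    simp only [List.foldl_cons]
    have hij : i ≠ j := hne j (List.mem_cons_self ..)
    rw [ih _ (fun j' hj' => hne j' (List.mem_cons_of_mem _ hj'))]
    have hstep : v ∈ (if pvB_share vsets i j then
          (a.modify i PySem.Set.empty (fun s => PySem.Set.add s j)).modify j PySem.Set.empty
            (fun s => PySem.Set.add s i)
        else a).getD w PySem.Set.empty
        ↔ v ∈ a.getD w PySem.Set.empty ∨
            (pvB_share vsets i j = true ∧ ((w = i ∧ v = j) ∨ (w = j ∧ v = i))) := by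
      split
      · rename_i hsh
        rw [PySem.Dict.getD_modify]
        by_cases hw : w = j
        · subst hw
          rw [if_pos rfl, PySem.Set.mem_add, PySem.Dict.getD_modify, if_neg (Ne.symm hij)]
          constructor
          · rintro (h | rfl)
            · exact Or.inl h
            · exact Or.inr ⟨hsh, Or.inr ⟨rfl, rfl⟩⟩
          · rintro (h | ⟨-, (⟨rfl, -⟩ | ⟨-, rfl⟩)⟩)
            · exact Or.inl h
            · exact absurd rfl (Ne.symm hij)
            · exact Or.inr rfl
        · rw [if_neg hw, PySem.Dict.getD_modify]
          by_cases hw' : w = i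
          · subst hw'
            rw [if_pos rfl, PySem.Set.mem_add]
            constructor
            · rintro (h | rfl)
              · exact Or.inl h
              · exact Or.inr ⟨hsh, Or.inl ⟨rfl, rfl⟩⟩
            · rintro (h | ⟨-, (⟨-, rfl⟩ | ⟨h1, -⟩)⟩)
              · exact Or.inl h
              · exact Or.inr rfl
              · exact absurd h1 hw
          · rw [if_neg hw']
            constructor
            · exact Or.inl
            · rintro (h | ⟨-, (⟨h1, -⟩ | ⟨h1, -⟩)⟩)
              · exact h
              · exact absurd h1 hw'
              · exact absurd h1 hw
      · rename_i hsh
        constructor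
        · exact Or.inl
        · rintro (h | ⟨h1, -⟩)
          · exact h
          · exact absurd h1 hsh
    rw [hstep]
    simp only [List.mem_cons]
    constructor
    · rintro ((h | hp) | ⟨j', hj', h1, h2⟩)
      · exact Or.inl h
      · exact Or.inr ⟨j, Or.inl rfl, hp.1, hp.2⟩
      · exact Or.inr ⟨j', Or.inr hj', h1, h2⟩
    · rintro (h | ⟨j', (rfl | hj'), h1, h2⟩)
      · exact Or.inl (Or.inl h)
      · exact Or.inl (Or.inr ⟨h1, h2⟩)
      · exact Or.inr ⟨j', hj', h1, h2⟩

theorem pvB_pairs_mem (vsets : List (PySem.Set Int)) (n : Int) (T : List Int)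
    (a : PySem.Dict Int (PySem.Set Int)) (w v : Int) :
    v ∈ (T.foldl (fun a i => pvB_inner vsets n i a) a).getD w PySem.Set.empty
      ↔ v ∈ a.getD w PySem.Set.empty ∨
          ∃ i ∈ T, ∃ j ∈ PySem.List.pyRange (i + 1) n 1, pvB_share vsets i j = true ∧
            ((w = i ∧ v = j) ∨ (w = j ∧ v = i)) := by
  induction T generalizing a with
  | nil => simp
  | cons i T ih =>
    simp only [List.foldl_cons]
    rw [ih]
    have hne : ∀ j ∈ PySem.List.pyRange (i + 1) n 1, i ≠ j := by
      intro j hj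
      have := (PySem.List.mem_pyRange_one.mp hj).1
      omega
    have hstep := pvB_inner_mem vsets (PySem.List.pyRange (i + 1) n 1) i a hne w v
    unfold pvB_inner
    rw [hstep]
    simp only [List.mem_cons]
    constructor
    · rintro ((h | ⟨j, hj, h1, h2⟩) | ⟨i', hi', rest⟩)
      · exact Or.inl h
      · exact Or.inr ⟨i, Or.inl rfl, j, hj, h1, h2⟩
      · exact Or.inr ⟨i', Or.inr hi', rest⟩
    · rintro (h | ⟨i', (rfl | hi'), rest⟩)
      · exact Or.inl (Or.inl h)
      · exact Or.inl (Or.inr rest)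
      · exact Or.inr ⟨i', hi', rest⟩

-- pvB_share in terms of the original vertex lists, for in-range indices
theorem pvB_share_iff (L : List (List Int)) (k k' : Nat) (hk : k < L.length) (hk' : k' < L.length) :
    pvB_share (L.map PySem.Set.ofList) (k : Int) (k' : Int) = true ↔
      ∃ v ∈ L.getD k [], v ∈ L.getD k' [] := by
  have hg : ∀ (m : Nat), m < L.length →
      PySem.List.pyGetD (L.map PySem.Set.ofList) (m : Int) PySem.Set.empty
        = PySem.Set.ofList (L.getD m []) := by
    intro m hm
    rw [PySem.List.pyGetD_eq_getElem _ _ (Int.natCast_nonneg m) (by simp; exact_mod_cast hm)]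
    simp only [List.getElem_map, Int.toNat_natCast]
    rw [List.getD_eq_getElem _ _ hm]
  unfold pvB_share
  rw [hg k hk, hg k' hk']
  constructor
  · intro h
    rw [Bool.not_eq_eq_eq_not, Bool.not_true] at h
    by_contra hno
    push Not at hno
    have : PySem.Set.isdisjoint (PySem.Set.ofList (L.getD k [])) (PySem.Set.ofList (L.getD k' [])) = true := by
      rw [PySem.Set.isdisjoint_iff]
      intro v hv
      rw [PySem.Set.mem_ofList] at hv ⊢
      exact hno v hv
    rw [this] at h
    cases h
  · rintro ⟨v, hv, hv'⟩
    rw [Bool.not_eq_eq_eq_not, Bool.not_true]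
    refine Bool.eq_false_iff.mpr ?_
    intro hdis
    rw [PySem.Set.isdisjoint_iff] at hdis
    exact hdis v ((PySem.Set.mem_ofList _ _).mpr hv) ((PySem.Set.mem_ofList _ _).mpr hv')

-- final characterisation of B's adjacency value
theorem pvB_final_mem (n_blocks : Int) (L : List (List Int)) (i j : Int) :
    j ∈ (pvB_pairs (L.map PySem.Set.ofList) ((L.map PySem.Set.ofList).length : Int) (pvB_init n_blocks)).getD i PySem.Set.empty
      ↔ ∃ (k k' : Nat), k < L.length ∧ k' < L.length ∧ i = (k : Int) ∧ j = (k' : Int) ∧ k ≠ k' ∧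
          ∃ v ∈ L.getD k [], v ∈ L.getD k' [] := by
  unfold pvB_pairs
  rw [pvB_pairs_mem, pvB_init_eq, pv_init_getD]
  simp only [PySem.Set.empty, List.not_mem_nil, false_or, List.length_map]
  constructor
  · rintro ⟨a, ha, b, hb, hsh, hcase⟩
    obtain ⟨ha0, ha1⟩ := PySem.List.mem_pyRange_one.mp ha
    obtain ⟨hb0, hb1⟩ := PySem.List.mem_pyRange_one.mp hb
    have hb0' : 0 ≤ b := by omega
    have hsh' : ∃ v ∈ L.getD a.toNat [], v ∈ L.getD b.toNat [] := by
      have := (pvB_share_iff L a.toNat b.toNat (by omega) (by omega)).mp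
      rw [Int.toNat_of_nonneg ha0, Int.toNat_of_nonneg hb0'] at this
      exact this hsh
    rcases hcase with ⟨rfl, rfl⟩ | ⟨rfl, rfl⟩
    · exact ⟨i.toNat, j.toNat, by omega, by omega,
        (Int.toNat_of_nonneg ha0).symm, (Int.toNat_of_nonneg hb0').symm, by omega, hsh'⟩
    · refine ⟨i.toNat, j.toNat, by omega, by omega,
        (Int.toNat_of_nonneg hb0').symm, (Int.toNat_of_nonneg ha0).symm, by omega, ?_⟩
      obtain ⟨v, hv, hv'⟩ := hsh'
      exact ⟨v, hv', hv⟩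
  · rintro ⟨k, k', hk, hk', rfl, rfl, hkk, v, hv, hv'⟩
    by_cases hlt : k < k'
    · refine ⟨(k : Int), ?_, (k' : Int), ?_, ?_, Or.inl ⟨rfl, rfl⟩⟩
      · exact PySem.List.mem_pyRange_one.mpr ⟨Int.natCast_nonneg k, by exact_mod_cast hk⟩
      · exact PySem.List.mem_pyRange_one.mpr ⟨by exact_mod_cast hlt, by exact_mod_cast hk'⟩
      · exact (pvB_share_iff L k k' hk hk').mpr ⟨v, hv, hv'⟩
    · have hlt' : k' < k := by omega
      refine ⟨(k' : Int), ?_, (k : Int), ?_, ?_, Or.inr ⟨rfl, rfl⟩⟩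
      · exact PySem.List.mem_pyRange_one.mpr ⟨Int.natCast_nonneg k', by exact_mod_cast hk'⟩
      · exact PySem.List.mem_pyRange_one.mpr ⟨by exact_mod_cast hlt', by exact_mod_cast hk⟩
      · exact (pvB_share_iff L k' k hk' hk).mpr ⟨v, hv', hv⟩

-- B keys are unchanged under Pre_
theorem pvB_inner_keys (vsets : List (PySem.Set Int)) (S : List Int) (i : Int)
    (a : PySem.Dict Int (PySem.Set Int)) (K : List Int) (hK : a.keys = K)
    (hb : ∀ j ∈ S, pvB_share vsets i j = true → i ∈ K ∧ j ∈ K) :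
    (S.foldl (fun a j =>
      if pvB_share vsets i j then
        (a.modify i PySem.Set.empty (fun s => PySem.Set.add s j)).modify j PySem.Set.empty
          (fun s => PySem.Set.add s i)
      else a) a).keys = K := by
  induction S generalizing a with
  | nil => exact hK
  | cons j S ih =>
    simp only [List.foldl_cons]
    refine ih _ ?_ (fun j' hj' => hb j' (List.mem_cons_of_mem _ hj'))
    split
    · rename_i hsh
      obtain ⟨hiK, hjK⟩ := hb j (List.mem_cons_self ..) hsh
      have hci : a.contains i = true := (PySem.Dict.contains_iff_mem_keys _ _).mpr (hK ▸ hiK)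
      have hk1 : (a.modify i PySem.Set.empty (fun s => PySem.Set.add s j)).keys = K := by
        rw [PySem.Dict.keys_modify, PySem.Dict.keys_insert_of_contains _ _ hci]; exact hK
      have hcj : (a.modify i PySem.Set.empty (fun s => PySem.Set.add s j)).contains j = true :=
        (PySem.Dict.contains_iff_mem_keys _ _).mpr (hk1 ▸ hjK)
      rw [PySem.Dict.keys_modify, PySem.Dict.keys_insert_of_contains _ _ hcj]
      exact hk1
    · exact hK

theorem pvB_pairs_keys (vsets : List (PySem.Set Int)) (n : Int) (T : List Int)
    (a : PySem.Dict Int (PySem.Set Int)) (K : List Int) (hK : a.keys = K)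
    (hb : ∀ i ∈ T, ∀ j ∈ PySem.List.pyRange (i + 1) n 1, pvB_share vsets i j = true → i ∈ K ∧ j ∈ K) :
    (T.foldl (fun a i => pvB_inner vsets n i a) a).keys = K := by
  induction T generalizing a with
  | nil => exact hK
  | cons i T ih =>
    simp only [List.foldl_cons]
    refine ih _ ?_ (fun i' hi' => hb i' (List.mem_cons_of_mem _ hi'))
    unfold pvB_inner
    exact pvB_inner_keys _ _ _ _ _ hK (hb i (List.mem_cons_self ..))

theorem pvB_final_keys (n_blocks : Int) (L : List (List Int))
    (hpre : Pre_build_block_adjacency n_blocks L) :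
    (pvB_pairs (L.map PySem.Set.ofList) ((L.map PySem.Set.ofList).length : Int) (pvB_init n_blocks)).keys
      = PySem.List.pyRange 0 n_blocks 1 := by
  unfold pvB_pairs
  refine pvB_pairs_keys _ _ _ _ _ (by rw [pvB_init_eq]; exact pv_init_keys n_blocks) ?_
  intro i hi j hj hsh
  obtain ⟨hi0, hi1⟩ := PySem.List.mem_pyRange_one.mp hi
  obtain ⟨hj0, hj1⟩ := PySem.List.mem_pyRange_one.mp hj
  simp only [List.length_map] at hi1 hj1
  have hsh' : ∃ v ∈ L.getD i.toNat [], v ∈ L.getD j.toNat [] := by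
    have := (pvB_share_iff L i.toNat j.toNat (by omega) (by omega)).mp
    rw [Int.toNat_of_nonneg hi0, Int.toNat_of_nonneg (by omega : (0:Int) ≤ j)] at this
    exact this hsh
  have hilt : (i.toNat : Int) < n_blocks :=
    hpre i.toNat (by omega) j.toNat (by omega) (by omega) hsh'
  have hjlt : (j.toNat : Int) < n_blocks := by
    obtain ⟨v, hv, hv'⟩ := hsh'
    exact hpre j.toNat (by omega) i.toNat (by omega) (by omega) ⟨v, hv', hv⟩
  rw [Int.toNat_of_nonneg hi0] at hilt
  rw [Int.toNat_of_nonneg (by omega : (0:Int) ≤ j)] at hjlt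
  exact ⟨PySem.List.mem_pyRange_one.mpr ⟨hi0, hilt⟩,
    PySem.List.mem_pyRange_one.mpr ⟨by omega, hjlt⟩⟩

-- B values have no duplicates
theorem pvB_nodupvals_inner (vsets : List (PySem.Set Int)) (S : List Int) (i : Int)
    (a : PySem.Dict Int (PySem.Set Int)) (h : ∀ w, (a.getD w PySem.Set.empty).Nodup) :
    ∀ w, ((S.foldl (fun a j =>
      if pvB_share vsets i j then
        (a.modify i PySem.Set.empty (fun s => PySem.Set.add s j)).modify j PySem.Set.empty
          (fun s => PySem.Set.add s i)
      else a) a).getD w PySem.Set.empty).Nodup := by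
  induction S generalizing a with
  | nil => exact h
  | cons j S ih =>
    simp only [List.foldl_cons]
    refine ih _ (fun w => ?_)
    split
    · rw [PySem.Dict.getD_modify]
      split
      · refine PySem.Set.nodup_add _ _ ?_
        rw [PySem.Dict.getD_modify]
        split
        · exact PySem.Set.nodup_add _ _ (h i)
        · exact h j
      · rw [PySem.Dict.getD_modify]
        split
        · exact PySem.Set.nodup_add _ _ (h i)
        · exact h w
    · exact h w

theorem pvB_nodupvals (vsets : List (PySem.Set Int)) (n : Int) (T : List Int)
    (a : PySem.Dict Int (PySem.Set Int)) (h : ∀ w, (a.getD w PySem.Set.empty).Nodup) :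
    ∀ w, ((T.foldl (fun a i => pvB_inner vsets n i a) a).getD w PySem.Set.empty).Nodup := by
  induction T generalizing a with
  | nil => exact h
  | cons i T ih =>
    simp only [List.foldl_cons]
    exact ih _ (pvB_nodupvals_inner vsets _ i a h)

theorem pv_main (n_blocks : Int) (L : List (List Int)) (hpre : Pre_build_block_adjacency n_blocks L) :
    build_block_adjacency n_blocks L = build_block_adjacency_alt n_blocks L := by
  simp only [build_block_adjacency, build_block_adjacency_alt]
  have hkeysA := pv_final_keys n_blocks L hpre
  have hkeysB := pvB_final_keys n_blocks L hpre
  have hnodupR : (PySem.List.pyRange 0 n_blocks 1).Nodup := PySem.List.nodup_pyRange_one 0 n_blocks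
  have hnodupA : ((pvA_v2b L).items.foldl pvA_pairStep (pvA_init n_blocks)).keys.Nodup := hkeysA ▸ hnodupR
  have hnodupB : (pvB_pairs (L.map PySem.Set.ofList) ((L.map PySem.Set.ofList).length : Int) (pvB_init n_blocks)).keys.Nodup := hkeysB ▸ hnodupR
  rw [PySem.Dict.items_eq_map_keys _ hnodupA PySem.Set.empty,
      PySem.Dict.items_eq_map_keys _ hnodupB PySem.Set.empty,
      hkeysA, hkeysB, List.map_map, List.map_map]
  refine List.map_congr_left ?_
  intro i _
  simp only [Function.comp]
  refine congrArg (Prod.mk i) ?_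
  have hvalA := pv_nodupvals_out3 ((pvA_v2b L).items) (pvA_init n_blocks)
    (fun w => by rw [pv_init_getD]; exact List.nodup_nil) i
  have hvalB : ((pvB_pairs (L.map PySem.Set.ofList) ((L.map PySem.Set.ofList).length : Int) (pvB_init n_blocks)).getD i PySem.Set.empty).Nodup := by
    unfold pvB_pairs
    exact pvB_nodupvals _ _ _ _ (fun w => by rw [pvB_init_eq, pv_init_getD]; exact List.nodup_nil) i
  refine PySem.List.sorted_eq_sorted_of_perm _ _ _ (fun a b h => h) ?_
  rw [List.perm_ext_iff_of_nodup hvalA hvalB]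
  intro j
  rw [pv_final_mem, pvB_final_mem]

-- ===== VERDICT (by name: the statement is the Claim_ definition above) =====
theorem build_block_adjacency_spec : Claim_equal_build_block_adjacency := by
  unfold Claim_equal_build_block_adjacency
  intro n_blocks block_vertex_lists _ hpre
  unfold Spec_build_block_adjacency
  exact pv_main n_blocks block_vertex_lists hpre
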